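-- pv_equiv track=rewrite | github.com/ricbit/advent-of-code | 2017/adv21-r.py | apply
-- ===== SOURCE A (Python) =====
-- def apply(rules, pattern, size, before, after):
--   final = []
--   for j in range(size // before):
--     line = []
--     for i in range(size // before):
--       k = []
--       for jj in range(before):
--         kk = []
--         for ii in range(before):
--           kk.append(pattern[j * before + jj][i * before + ii])
--         k.append("".join(kk))
--       dst = rules["/".join(k)].split("/")
--       line.append(dst)
--     final.append(line)
--   newp = [[0] * (size // before * after) for _ in range(size // before * after)]
--   for j in range(size // before):
--     for i in range(size // before):
--       for jj in range(after):
--         for ii in range(after):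
--           newp[j * after + jj][i * after + ii] = final[j][i][jj][ii]
--   return newp
-- ===== SOURCE B (Python) =====
-- def block_key(pattern, before, j, i):
--     return "/".join(
--         "".join(pattern[j * before + jj][i * before + ii] for ii in range(before))
--         for jj in range(before))
--
--
-- def apply(rules, pattern, size, before, after):
--     n = size // before
--     result = []
--     for j in range(n):
--         blocks = [rules[block_key(pattern, before, j, i)].split("/") for i in range(n)]
--         for jj in range(after):
--             row = []
--             for blk in blocks:
--                 row.extend(blk[jj])
--             result.append(row)
--     return result
-- ===== Notes on version B (the rewrite author's own statement) =====
-- stated objective: simpler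
-- what changed: B drops A's intermediate block grid 'final' and the pre-allocated zero matrix with its four-deep index-copy loops, instead assembling each output row directly: per block-row it looks up the replacement lines once and emits each output row left-to-right by extending with the jj-th line of every block.
-- outside the precondition, e.g. on apply({'x': 'ab/cd'}, [['x']], 1, 1, 1): A returns [['a']], B returns [['a', 'b']]; on apply({}, [], 2, -1, -1): A returns [[0, 0], [0, 0]], B returns []
import Mathlib
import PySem

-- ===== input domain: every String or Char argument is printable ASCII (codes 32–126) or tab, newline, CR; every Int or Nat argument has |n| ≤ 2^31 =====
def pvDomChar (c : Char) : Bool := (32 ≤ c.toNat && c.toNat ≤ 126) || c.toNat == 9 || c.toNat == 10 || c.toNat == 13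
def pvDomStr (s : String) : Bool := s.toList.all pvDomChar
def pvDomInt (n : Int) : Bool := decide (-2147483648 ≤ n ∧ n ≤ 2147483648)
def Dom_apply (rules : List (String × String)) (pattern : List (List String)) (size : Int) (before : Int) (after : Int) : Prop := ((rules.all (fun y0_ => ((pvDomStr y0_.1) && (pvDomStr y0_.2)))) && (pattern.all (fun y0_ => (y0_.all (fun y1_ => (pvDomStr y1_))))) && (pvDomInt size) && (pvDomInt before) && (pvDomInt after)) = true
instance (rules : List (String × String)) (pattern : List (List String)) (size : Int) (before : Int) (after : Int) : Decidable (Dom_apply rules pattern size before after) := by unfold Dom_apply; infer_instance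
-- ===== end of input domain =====

-- B replaces A's intermediate block grid and pre-allocated scratch matrix by direct row-by-row
-- assembly of the output (objective: simpler, one pass, no scratch matrix).

-- ===== PORT A =====
-- Literal port of A. Raising accesses (pattern index out of range, missing rule key, too few
-- replacement lines, before = 0) are excluded by Pre_apply, so the `.getD` defaults are never
-- reached on admitted inputs; Python's int-0 placeholders in `newp` are ported as the string "0" —
-- on every input admitted by Pre_apply they are all overwritten.
def apply (rules : List (String × String)) (pattern : List (List String)) (size : Int) (before : Int) (after : Int) : List (List String) :=
  let final : List (List (List String)) :=
    (PySem.List.pyRange 0 (PySem.Int.floordiv size before) 1).foldl (fun final j =>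
      let line : List (List String) :=
        (PySem.List.pyRange 0 (PySem.Int.floordiv size before) 1).foldl (fun line i =>
          let k : List String :=
            (PySem.List.pyRange 0 before 1).foldl (fun k jj =>
              let kk : List String :=
                (PySem.List.pyRange 0 before 1).foldl (fun kk ii =>
                  kk ++ [PySem.List.pyGetD (PySem.List.pyGetD pattern (j * before + jj) []) (i * before + ii) ""]) []
              k ++ [PySem.Str.join "" kk]) []
          let dst : List String :=
            (PySem.Str.split? (((PySem.Dict.mk rules).get? (PySem.Str.join "/" k)).getD "") "/").getD []
          line ++ [dst]) []
      final ++ [line]) []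
  let newp0 : List (List String) :=
    (PySem.List.pyRange 0 (PySem.Int.floordiv size before * after) 1).map
      (fun _ => PySem.List.pyRepeat ["0"] (PySem.Int.floordiv size before * after))
  (PySem.List.pyRange 0 (PySem.Int.floordiv size before) 1).foldl (fun newp j =>
    (PySem.List.pyRange 0 (PySem.Int.floordiv size before) 1).foldl (fun newp i =>
      (PySem.List.pyRange 0 after 1).foldl (fun newp jj =>
        (PySem.List.pyRange 0 after 1).foldl (fun newp ii =>
          newp.set (j * after + jj).toNat
            ((newp.getD (j * after + jj).toNat []).set (i * after + ii).toNat
              (((PySem.Str.pyGet?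
                  (PySem.List.pyGetD (PySem.List.pyGetD (PySem.List.pyGetD final j []) i []) jj "")
                  ii).map (fun c => String.ofList [c])).getD ""))) newp) newp) newp) newp0

-- ===== PORT B =====
-- Source B helper block_key: "/".join of "".join of the block's cells.
def blockKey (pattern : List (List String)) (before : Int) (j i : Int) : String :=
  PySem.Str.join "/" ((PySem.List.pyRange 0 before 1).map (fun jj =>
    PySem.Str.join "" ((PySem.List.pyRange 0 before 1).map (fun ii =>
      PySem.List.pyGetD (PySem.List.pyGetD pattern (j * before + jj) []) (i * before + ii) ""))))

-- Literal port of B (Source B): per block-row decode the blocks once, then emit each output row by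
-- extending with the jj-th replacement line of every block (Python iterates a str by code points,
-- ported as `.toList.map` into 1-character strings; exact on the admitted inputs).
def apply_alt (rules : List (String × String)) (pattern : List (List String)) (size : Int) (before : Int) (after : Int) : List (List String) :=
  (PySem.List.pyRange 0 (PySem.Int.floordiv size before) 1).foldl (fun result j =>
    let blocks : List (List String) :=
      (PySem.List.pyRange 0 (PySem.Int.floordiv size before) 1).map (fun i =>
        (PySem.Str.split? (((PySem.Dict.mk rules).get? (blockKey pattern before j i)).getD "") "/").getD [])
    (PySem.List.pyRange 0 after 1).foldl (fun result jj =>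
      result ++ [blocks.foldl (fun row blk =>
        row ++ (PySem.List.pyGetD blk jj "").toList.map (fun c => String.ofList [c])) []]) result) []

-- ===== PRECONDITION & SPEC =====
-- The replacement lines of the block at block-coordinates (j, i).
def pvLines (rules : List (String × String)) (pattern : List (List String)) (before : Int) (j i : Int) : List String :=
  (PySem.Str.split? (((PySem.Dict.mk rules).get? (blockKey pattern before j i)).getD "") "/").getD []

-- Pre_ excludes inputs where A raises (before = 0 division, out-of-range pattern access, missing
-- rule key, fewer replacement lines than `after`), inputs where A's int-0 placeholders survive into
-- the result (so it is not a list of strings at all), and — a defensible unspecified corner — rule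
-- lines longer than `after` characters, which A silently truncates while B emits the whole line.
def Pre_apply (rules : List (String × String)) (pattern : List (List String)) (size : Int) (before : Int) (after : Int) : Prop :=
  (1 ≤ before ∧
    (0 ≤ PySem.Int.floordiv size before ∨ 0 ≤ after) ∧
    ((PySem.Int.floordiv size before).toNat * before.toNat ≤ pattern.length ∧
     (∀ row ∈ pattern.take ((PySem.Int.floordiv size before).toNat * before.toNat),
        (PySem.Int.floordiv size before).toNat * before.toNat ≤ row.length) ∧
     ∀ j, j < (PySem.Int.floordiv size before).toNat →
     ∀ i, i < (PySem.Int.floordiv size before).toNat →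
       (((PySem.Dict.mk rules).get? (blockKey pattern before (j : Int) (i : Int))).isSome = true ∧
        after ≤ PySem.List.len (pvLines rules pattern before (j : Int) (i : Int)) ∧
        ∀ l ∈ (pvLines rules pattern before (j : Int) (i : Int)).take after.toNat,
          PySem.Str.len l = after)))
  ∨ (before ≤ -1 ∧ PySem.Int.floordiv size before ≤ 0 ∧ PySem.Int.floordiv size before * after ≤ 0)

instance (rules : List (String × String)) (pattern : List (List String)) (size : Int) (before : Int) (after : Int) : Decidable (Pre_apply rules pattern size before after) := by unfold Pre_apply; infer_instance

def pvWitness_apply : (List (String × String)) × List (List String) × Int × Int × Int :=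
  ([(".", "#")], [["."]], 1, 1, 1)

def Spec_apply (rules : List (String × String)) (pattern : List (List String)) (size : Int) (before : Int) (after : Int) (out : List (List String)) : Prop := out = apply_alt rules pattern size before after
instance (rules : List (String × String)) (pattern : List (List String)) (size : Int) (before : Int) (after : Int) (out : List (List String)) : Decidable (Spec_apply rules pattern size before after out) := by unfold Spec_apply; infer_instance

-- ===== CLAIM (what is proved, stated in full; the proofs are below) =====
def Claim_equal_apply : Prop := ∀ (rules : List (String × String)) (pattern : List (List String)) (size : Int) (before : Int) (after : Int), Dom_apply rules pattern size before after → Pre_apply rules pattern size before after → Spec_apply rules pattern size before after (apply rules pattern size before after)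

-- ===== LEMMAS AND PROOFS =====

theorem pvWitness_ok : Dom_apply pvWitness_apply.1 pvWitness_apply.2.1 pvWitness_apply.2.2.1 pvWitness_apply.2.2.2.1 pvWitness_apply.2.2.2.2 ∧ Pre_apply pvWitness_apply.1 pvWitness_apply.2.1 pvWitness_apply.2.2.1 pvWitness_apply.2.2.2.1 pvWitness_apply.2.2.2.2 := by
  constructor <;> decide

-- one matrix write newp[r][c] = v, as performed by A's fill loop
def pvDoSet (m : List (List String)) (w : Nat × Nat × String) : List (List String) :=
  m.set w.1 ((m.getD w.1 []).set w.2.1 w.2.2)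


-- the value A copies out of `final` at nat coordinates (raw pyGetD chain, no bounds needed)
def pvVal (finalM : List (List (List String))) (j i jj ii : Nat) : String :=
  ((PySem.Str.pyGet?
      (PySem.List.pyGetD (PySem.List.pyGetD (PySem.List.pyGetD finalM (j : Int) []) (i : Int) []) (jj : Int) "")
      (ii : Int)).map (fun c => String.ofList [c])).getD ""

-- the flattened list of writes performed by A's fill loop
def pvWrites (finalM : List (List (List String))) (n a : Nat) : List (Nat × Nat × String) :=
  (List.range n).flatMap (fun j => (List.range n).flatMap (fun i =>
    (List.range a).flatMap (fun jj => (List.range a).map (fun ii =>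
      (j * a + jj, i * a + ii, pvVal finalM j i jj ii)))))

-- A's intermediate `final` grid, in map form
def pvFinalM (rules : List (String × String)) (pattern : List (List String)) (size : Int) (before : Int) : List (List (List String)) :=
  (PySem.List.pyRange 0 (PySem.Int.floordiv size before) 1).map (fun j =>
    (PySem.List.pyRange 0 (PySem.Int.floordiv size before) 1).map (fun i =>
      pvLines rules pattern before j i))

theorem pv_len_foldl (ws : List (Nat × Nat × String)) (m : List (List String)) :
    (ws.foldl pvDoSet m).length = m.length := by
  induction ws generalizing m with
  | nil => rfl
  | cons w t ih => simp [List.foldl_cons, ih, pvDoSet]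

theorem pv_rowlen_doSet (m : List (List String)) (w : Nat × Nat × String) (r : Nat) :
    ((pvDoSet m w).getD r []).length = ((m.getD r []).length) := by
  simp only [pvDoSet, List.getD_eq_getElem?_getD, List.getElem?_set]
  by_cases h1 : w.1 = r
  · subst h1
    by_cases h2 : w.1 < m.length
    · simp [h2]
    · simp [h2]
  · simp [h1]

theorem pv_rowlen_foldl (ws : List (Nat × Nat × String)) (m : List (List String)) (r : Nat) :
    (((ws.foldl pvDoSet m)).getD r []).length = ((m.getD r []).length) := by
  induction ws generalizing m with
  | nil => rfl
  | cons w t ih => rw [List.foldl_cons, ih, pv_rowlen_doSet]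

theorem pv_entry_doSet_miss (m : List (List String)) (w : Nat × Nat × String) (r c : Nat)
    (h : (w.1, w.2.1) ≠ (r, c)) :
    ((pvDoSet m w).getD r []).getD c "" = (m.getD r []).getD c "" := by
  simp only [pvDoSet, List.getD_eq_getElem?_getD, List.getElem?_set]
  by_cases h1 : w.1 = r
  · subst h1
    have h2 : w.2.1 ≠ c := by intro hc; exact h (by simp [hc])
    by_cases h3 : w.1 < m.length
    · simp [h3, List.getElem?_set_ne h2]
    · simp [h3]
  · simp [h1]

theorem pv_entry_foldl_miss (ws : List (Nat × Nat × String)) (m : List (List String)) (r c : Nat)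
    (h : ∀ w ∈ ws, (w.1, w.2.1) ≠ (r, c)) :
    (((ws.foldl pvDoSet m)).getD r []).getD c "" = (m.getD r []).getD c "" := by
  induction ws generalizing m with
  | nil => rfl
  | cons w t ih =>
      rw [List.foldl_cons, ih _ (fun w' hw' => h w' (List.mem_cons_of_mem _ hw')),
        pv_entry_doSet_miss _ _ _ _ (h w (List.mem_cons_self ..))]

theorem pv_entry_foldl_hit (s t : List (Nat × Nat × String)) (m : List (List String))
    (w : Nat × Nat × String)
    (hmiss : ∀ w' ∈ t, (w'.1, w'.2.1) ≠ (w.1, w.2.1))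
    (hr : w.1 < m.length) (hc : w.2.1 < (m.getD w.1 []).length) :
    ((((s ++ w :: t).foldl pvDoSet m)).getD w.1 []).getD w.2.1 "" = w.2.2 := by
  rw [List.foldl_append, List.foldl_cons, pv_entry_foldl_miss _ _ _ _ hmiss]
  have hr1 : w.1 < (s.foldl pvDoSet m).length := by rw [pv_len_foldl]; exact hr
  have hc1 : w.2.1 < ((s.foldl pvDoSet m).getD w.1 []).length := by rw [pv_rowlen_foldl]; exact hc
  have hrow : (s.foldl pvDoSet m).getD w.1 [] = (s.foldl pvDoSet m)[w.1] := by
    simp [List.getD_eq_getElem?_getD, List.getElem?_eq_getElem hr1]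
  rw [hrow] at hc1
  simp [pvDoSet, List.getD_eq_getElem?_getD, hr1, hc1]

-- targets of the writes are pairwise distinct
theorem pv_mem_block {a j i : Nat} {x : Nat × Nat}
    (hx : x ∈ (List.range a).flatMap (fun jj => (List.range a).map (fun ii => (j * a + jj, i * a + ii)))) :
    j * a ≤ x.1 ∧ x.1 < j * a + a ∧ i * a ≤ x.2 ∧ x.2 < i * a + a := by
  simp only [List.mem_flatMap, List.mem_map, List.mem_range] at hx
  obtain ⟨jj, hjj, ii, hii, rfl⟩ := hx
  omega

theorem pv_targets_nodup (F : List (List (List String))) (n a : Nat) :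
    ((pvWrites F n a).map (fun w => (w.1, w.2.1))).Nodup := by
  unfold pvWrites
  simp only [List.map_flatMap, List.map_map, Function.comp_def]
  rw [List.nodup_flatMap]
  refine ⟨fun j hj => ?_, ?_⟩
  · rw [List.nodup_flatMap]
    refine ⟨fun i hi => ?_, ?_⟩
    · rw [List.nodup_flatMap]
      refine ⟨fun jj hjj => ?_, ?_⟩
      · exact List.nodup_range.map_on (by
          intro x hx y hy hxy
          simp only [Prod.mk.injEq] at hxy
          omega)
      · refine List.pairwise_lt_range.imp_of_mem ?_
        intro jj jj' hjj hjj' hlt x hx hx'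
        simp only [List.mem_map, List.mem_range] at hx hx'
        obtain ⟨ii, hii, rfl⟩ := hx
        obtain ⟨ii', hii', he⟩ := hx'
        simp only [Prod.mk.injEq] at he
        omega
    · refine List.pairwise_lt_range.imp_of_mem ?_
      intro i i' hi hi' hlt x hx hx'
      have h1 := pv_mem_block hx
      have h2 := pv_mem_block hx'
      have h3 : (i + 1) * a ≤ i' * a := Nat.mul_le_mul_right a (Nat.succ_le_of_lt hlt)
      have h4 : (i + 1) * a = i * a + a := by ring
      omega
  · refine List.pairwise_lt_range.imp_of_mem ?_
    intro j j' hj hj' hlt x hx hx'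
    simp only [List.mem_flatMap, List.mem_range, List.mem_map] at hx hx'
    obtain ⟨i, hi, jj, hjj, ii, hii, rfl⟩ := hx
    obtain ⟨i', hi', jj', hjj', ii', hii', he⟩ := hx'
    simp only [Prod.mk.injEq] at he
    have h3 : (j + 1) * a ≤ j' * a := Nat.mul_le_mul_right a (Nat.succ_le_of_lt hlt)
    have h4 : (j + 1) * a = j * a + a := by ring
    omega

theorem pv_writes_entry (F : List (List (List String))) (n a : Nat) (m0 : List (List String))
    (h0l : m0.length = n * a) (h0r : ∀ r, r < n * a → (m0.getD r []).length = n * a)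
    (j i jj ii : Nat) (hj : j < n) (hi : i < n) (hjj : jj < a) (hii : ii < a) :
    (((pvWrites F n a).foldl pvDoSet m0).getD (j * a + jj) []).getD (i * a + ii) ""
      = pvVal F j i jj ii := by
  have hr : j * a + jj < n * a := by
    have h1 : (j + 1) * a ≤ n * a := Nat.mul_le_mul_right a (Nat.succ_le_of_lt hj)
    have h2 : (j + 1) * a = j * a + a := by ring
    omega
  have hc : i * a + ii < n * a := by
    have h1 : (i + 1) * a ≤ n * a := Nat.mul_le_mul_right a (Nat.succ_le_of_lt hi)
    have h2 : (i + 1) * a = i * a + a := by ring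
    omega
  have hw : (j * a + jj, i * a + ii, pvVal F j i jj ii) ∈ pvWrites F n a := by
    unfold pvWrites
    simp only [List.mem_flatMap, List.mem_map, List.mem_range]
    exact ⟨j, hj, i, hi, jj, hjj, ii, hii, rfl⟩
  obtain ⟨s, t, hst⟩ := List.append_of_mem hw
  have hnodup := pv_targets_nodup F n a
  rw [hst, List.map_append, List.map_cons] at hnodup
  have hnot := (List.nodup_cons.mp (List.Nodup.of_append_right hnodup)).1
  have hmiss : ∀ w' ∈ t, (w'.1, w'.2.1) ≠ (j * a + jj, i * a + ii) := by
    intro w' hw' he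
    exact hnot (he ▸ List.mem_map_of_mem hw')
  have := pv_entry_foldl_hit s t m0
    (j * a + jj, i * a + ii, pvVal F j i jj ii) hmiss
    (by rw [h0l]; exact hr) (by rw [h0r _ hr]; exact hc)
  simp only at this
  rw [hst]
  exact this

theorem pv_apply_eq_writes (rules : List (String × String)) (pattern : List (List String))
    (size before after : Int) (n a : Nat)
    (hN : PySem.Int.floordiv size before = (n : Int)) (hA : after = (a : Int)) :
    apply rules pattern size before after
      = (pvWrites (pvFinalM rules pattern size before) n a).foldl pvDoSet
          (List.replicate (n * a) (List.replicate (n * a) "0")) := by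
  have hmul : PySem.Int.floordiv size before * after = ((n * a : Nat) : Int) := by
    rw [hN, hA]; push_cast; ring
  unfold apply
  simp only [hN, hA, PySem.List.foldl_append_singleton_eq_map, List.nil_append,
    PySem.List.pyRange_zero_natCast, List.foldl_map, List.map_map,
    PySem.List.pyRepeat_singleton, Int.toNat_natCast,
    ← Nat.cast_mul, ← Nat.cast_add]
  simp only [pvWrites, pvFinalM, pvLines, blockKey, pvVal, pvDoSet,
    List.foldl_flatMap, List.foldl_map, hN,
    PySem.List.pyRange_zero_natCast, List.map_map, Function.comp_def,
    List.map_const', List.length_range]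


theorem pv_getD_eq {α : Type} (l : List α) (r : Nat) (d : α) (h : r < l.length) :
    l.getD r d = l[r] := by
  simp [List.getD_eq_getElem?_getD, List.getElem?_eq_getElem h]

theorem pv_alt_eq (rules : List (String × String)) (pattern : List (List String))
    (size before after : Int) (n a : Nat)
    (hN : PySem.Int.floordiv size before = (n : Int)) (hA : after = (a : Int)) :
    apply_alt rules pattern size before after
      = (List.range n).flatMap (fun (j : Nat) => (List.range a).map (fun (jj : Nat) =>
          (List.range n).flatMap (fun (i : Nat) =>
            (PySem.List.pyGetD (pvLines rules pattern before (j : Int) (i : Int)) (jj : Int) "").toList.map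
              (fun c => String.ofList [c])))) := by
  unfold apply_alt
  simp only [hN, hA, PySem.List.pyRange_zero_natCast, List.foldl_map, List.map_map,
    PySem.List.foldl_append_singleton_eq_map, PySem.List.foldl_append_eq_flatMap,
    List.nil_append, pvLines, Function.comp_def]

theorem pv_len_flatMap_uniform {α : Type} (f : Nat → List α) (n a : Nat)
    (hlen : ∀ k, k < n → (f k).length = a) : ((List.range n).flatMap f).length = n * a := by
  induction n with
  | zero => simp
  | succ m ih =>
      rw [List.range_succ, List.flatMap_append]
      simp only [List.length_append, ih (fun k hk => hlen k (by omega)),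
        List.flatMap_cons, List.flatMap_nil, List.append_nil, hlen m (by omega)]
      ring

theorem pv_getElem?_flatMap_uniform {α : Type} (f : Nat → List α) (n a j jj : Nat)
    (hlen : ∀ k, k < n → (f k).length = a) (hj : j < n) (hjj : jj < a) :
    ((List.range n).flatMap f)[j * a + jj]? = (f j)[jj]? := by
  induction n with
  | zero => omega
  | succ m ih =>
      rw [List.range_succ, List.flatMap_append]
      have hL : ((List.range m).flatMap f).length = m * a :=
        pv_len_flatMap_uniform f m a (fun k hk => hlen k (by omega))
      by_cases hjm : j < m
      · rw [List.getElem?_append_left (by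
          rw [hL]
          have h1 : (j + 1) * a ≤ m * a := Nat.mul_le_mul_right a (Nat.succ_le_of_lt hjm)
          have h2 : (j + 1) * a = j * a + a := by ring
          omega)]
        exact ih (fun k hk => hlen k (by omega)) hjm
      · have hj' : j = m := by omega
        subst hj'
        simp only [List.flatMap_cons, List.flatMap_nil, List.append_nil]
        rw [List.getElem?_append_right (by rw [hL]; omega)]
        rw [hL]
        congr 1
        omega

theorem pv_eq_main (rules : List (String × String)) (pattern : List (List String))
    (size before after : Int) (n a : Nat)
    (hN : PySem.Int.floordiv size before = (n : Int)) (hA : after = (a : Int))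
    (hshape : ∀ j, j < n → ∀ i, i < n →
       a ≤ (pvLines rules pattern before (j : Int) (i : Int)).length ∧
       ∀ l ∈ (pvLines rules pattern before (j : Int) (i : Int)).take a, l.toList.length = a) :
    apply rules pattern size before after = apply_alt rules pattern size before after := by
  rw [pv_apply_eq_writes rules pattern size before after n a hN hA,
    pv_alt_eq rules pattern size before after n a hN hA]
  set F := pvFinalM rules pattern size before with hF
  -- the jj-th replacement line of block (j,i) has exactly a characters
  have hline : ∀ j i jj : Nat, j < n → i < n → jj < a →
      (PySem.List.pyGetD (pvLines rules pattern before (j : Int) (i : Int)) (jj : Int) "").toList.length = a := by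
    intro j i jj hj hi hjj
    obtain ⟨hlen, hall⟩ := hshape j hj i hi
    have hjl : jj < (pvLines rules pattern before (j : Int) (i : Int)).length := by omega
    rw [PySem.List.pyGetD_natCast, pv_getD_eq _ _ _ hjl]
    refine hall _ ?_
    have h2 : jj < ((pvLines rules pattern before (j : Int) (i : Int)).take a).length := by
      simp [List.length_take]; omega
    have h3 := List.getElem_mem h2
    rwa [List.getElem_take] at h3
  -- row (j,jj) of the B side
  have hlenouter : ∀ k, k < n → ((List.range a).map (fun (jj : Nat) =>
      (List.range n).flatMap (fun (i : Nat) =>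
        (PySem.List.pyGetD (pvLines rules pattern before (k : Int) (i : Int)) (jj : Int) "").toList.map
          (fun c => String.ofList [c])))).length = a := by
    intro k _; simp
  apply List.ext_getElem
  · rw [pv_len_foldl, List.length_replicate,
      pv_len_flatMap_uniform _ n a hlenouter]
  · intro r h1 h2
    have hna : r < n * a := by rwa [pv_len_foldl, List.length_replicate] at h1
    have ha : 0 < a := by
      rcases Nat.eq_zero_or_pos a with h | h
      · subst h; simp at hna
      · exact h
    obtain ⟨j, jj, hj, hjj, rfl⟩ : ∃ j jj, j < n ∧ jj < a ∧ r = j * a + jj := by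
      refine ⟨r / a, r % a, (Nat.div_lt_iff_lt_mul ha).mpr hna, Nat.mod_lt _ ha, ?_⟩
      rw [Nat.mul_comm]; exact (Nat.div_add_mod r a).symm
    -- identify the right-hand row
    have hR : ((List.range n).flatMap (fun (j : Nat) => (List.range a).map (fun (jj : Nat) =>
        (List.range n).flatMap (fun (i : Nat) =>
          (PySem.List.pyGetD (pvLines rules pattern before (j : Int) (i : Int)) (jj : Int) "").toList.map
            (fun c => String.ofList [c])))))[j * a + jj]? = some
          ((List.range n).flatMap (fun (i : Nat) =>
            (PySem.List.pyGetD (pvLines rules pattern before (j : Int) (i : Int)) (jj : Int) "").toList.map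
              (fun c => String.ofList [c]))) := by
      rw [pv_getElem?_flatMap_uniform _ n a j jj hlenouter hj hjj]
      rw [List.getElem?_map, List.getElem?_eq_getElem (by simpa using hjj)]
      simp
    have hRr := List.getElem?_eq_getElem h2
    rw [hR] at hRr
    rw [← Option.some_inj.mp hRr]
    -- the rows, entry by entry
    have hrowlen : ((pvWrites F n a).foldl pvDoSet
        (List.replicate (n * a) (List.replicate (n * a) "0")))[j * a + jj].length = n * a := by
      have hgd := pv_rowlen_foldl (pvWrites F n a) (List.replicate (n * a) (List.replicate (n * a) "0")) (j * a + jj)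
      rw [pv_getD_eq _ _ _ h1] at hgd
      rw [hgd, pv_getD_eq _ _ _ (by simpa using hna), List.getElem_replicate, List.length_replicate]
    have hlininner : ∀ k, k < n →
        ((PySem.List.pyGetD (pvLines rules pattern before (j : Int) (k : Int)) (jj : Int) "").toList.map
          (fun c => String.ofList [c])).length = a := by
      intro k hk; rw [List.length_map]; exact hline j k jj hj hk hjj
    apply List.ext_getElem
    · rw [hrowlen, pv_len_flatMap_uniform _ n a hlininner]
    · intro c hc1 hc2
      have hcna : c < n * a := by rwa [hrowlen] at hc1
      obtain ⟨i, ii, hi, hii, rfl⟩ : ∃ i ii, i < n ∧ ii < a ∧ c = i * a + ii := by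
        refine ⟨c / a, c % a, (Nat.div_lt_iff_lt_mul ha).mpr hcna, Nat.mod_lt _ ha, ?_⟩
        rw [Nat.mul_comm]; exact (Nat.div_add_mod c a).symm
      -- left entry
      have hL := pv_writes_entry F n a (List.replicate (n * a) (List.replicate (n * a) "0"))
        (by simp) (fun r hr => by rw [pv_getD_eq _ _ _ (by simpa using hr), List.getElem_replicate, List.length_replicate])
        j i jj ii hj hi hjj hii
      rw [pv_getD_eq _ _ _ h1, pv_getD_eq _ _ _ hc1] at hL
      rw [hL]
      -- right entry
      have hline' := hline j i jj hj hi hjj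
      have hR2 : ((List.range n).flatMap (fun (i : Nat) =>
          (PySem.List.pyGetD (pvLines rules pattern before (j : Int) (i : Int)) (jj : Int) "").toList.map
            (fun c => String.ofList [c])))[i * a + ii]? = some (String.ofList
              [(PySem.List.pyGetD (pvLines rules pattern before (j : Int) (i : Int)) (jj : Int) "").toList[ii]'(by rw [hline']; exact hii)]) := by
        rw [pv_getElem?_flatMap_uniform _ n a i ii hlininner hi hii]
        rw [List.getElem?_map, List.getElem?_eq_getElem (by rw [hline']; exact hii)]
        rfl
      have hRc := List.getElem?_eq_getElem hc2
      rw [hR2] at hRc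
      rw [← Option.some_inj.mp hRc]
      -- unfold pvVal and finish
      have hval : pvVal F j i jj ii =
          ((PySem.Str.pyGet? (PySem.List.pyGetD (pvLines rules pattern before (j : Int) (i : Int)) (jj : Int) "") ((ii : Nat) : Int)).map
            (fun ch => String.ofList [ch])).getD "" := by
        simp only [pvVal, hF, pvFinalM, hN, PySem.List.pyRange_zero_natCast, List.map_map,
          Function.comp_def, PySem.List.pyGetD_natCast]
        rw [PySem.List.getD_map_range _ _ _ _ hj, PySem.List.getD_map_range _ _ _ _ hi]
      rw [hval, PySem.Str.pyGet?_natCast,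
        List.getElem?_eq_getElem (by rw [hline']; exact hii)]
      rfl

theorem pvA_nil (rules : List (String × String)) (pattern : List (List String))
    (size before after : Int)
    (hN : PySem.Int.floordiv size before ≤ 0)
    (hNA : PySem.Int.floordiv size before * after ≤ 0) :
    apply rules pattern size before after = [] := by
  unfold apply
  rw [PySem.List.pyRange_one_eq_nil hN, PySem.List.pyRange_one_eq_nil hNA]
  simp

theorem pvA_nil2 (rules : List (String × String)) (pattern : List (List String))
    (size before after : Int)
    (hA : after ≤ 0)
    (hNA : PySem.Int.floordiv size before * after ≤ 0) :
    apply rules pattern size before after = [] := by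
  unfold apply
  rw [PySem.List.pyRange_one_eq_nil hA, PySem.List.pyRange_one_eq_nil hNA]
  simp [List.foldl_fixed]

theorem pvB_nil (rules : List (String × String)) (pattern : List (List String))
    (size before after : Int)
    (hN : PySem.Int.floordiv size before ≤ 0) :
    apply_alt rules pattern size before after = [] := by
  unfold apply_alt
  rw [PySem.List.pyRange_one_eq_nil hN]
  rfl

theorem pvB_nil2 (rules : List (String × String)) (pattern : List (List String))
    (size before after : Int)
    (hA : after ≤ 0) :
    apply_alt rules pattern size before after = [] := by
  unfold apply_alt
  rw [PySem.List.pyRange_one_eq_nil hA]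
  simp [List.foldl_fixed]



-- ===== VERDICT (by name: the statement is the Claim_ definition above) =====
theorem apply_spec : Claim_equal_apply := by
  unfold Claim_equal_apply
  intro rules pattern size before after _hdom hpre
  unfold Spec_apply
  rcases hpre with ⟨_hb, hor, _hp1, _hp2, hsh⟩ | ⟨_hb, hn, hna⟩
  · by_cases hNpos : 0 ≤ PySem.Int.floordiv size before
    · by_cases hApos : 0 ≤ after
      · obtain ⟨n, hN⟩ : ∃ n : Nat, PySem.Int.floordiv size before = (n : Int) :=
          ⟨(PySem.Int.floordiv size before).toNat, (Int.toNat_of_nonneg hNpos).symm⟩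
        obtain ⟨a, hA⟩ : ∃ a : Nat, after = (a : Int) :=
          ⟨after.toNat, (Int.toNat_of_nonneg hApos).symm⟩
        refine pv_eq_main rules pattern size before after n a hN hA ?_
        intro j hj i hi
        have hj' : j < (PySem.Int.floordiv size before).toNat := by rw [hN]; simpa using hj
        have hi' : i < (PySem.Int.floordiv size before).toNat := by rw [hN]; simpa using hi
        obtain ⟨_hk, hlen, hall⟩ := hsh j hj' i hi'
        refine ⟨?_, ?_⟩
        · rw [PySem.List.len_eq, hA] at hlen
          exact_mod_cast hlen
        · intro l hl
          have hl' : l ∈ (pvLines rules pattern before (j : Int) (i : Int)).take after.toNat := by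
            rw [hA, Int.toNat_natCast]; exact hl
          have := hall l hl'
          rw [PySem.Str.len_eq, hA] at this
          exact_mod_cast this
      · have hA0 : after ≤ 0 := by omega
        rw [pvA_nil2 rules pattern size before after hA0
            (mul_nonpos_iff.mpr (Or.inl ⟨hNpos, hA0⟩)),
          pvB_nil2 rules pattern size before after hA0]
    · have hN0 : PySem.Int.floordiv size before ≤ 0 := by omega
      have hApos : 0 ≤ after := hor.resolve_left hNpos
      rw [pvA_nil rules pattern size before after hN0
          (mul_nonpos_iff.mpr (Or.inr ⟨hN0, hApos⟩)),
        pvB_nil rules pattern size before after hN0]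
  · rw [pvA_nil rules pattern size before after hn hna,
      pvB_nil rules pattern size before after hn]
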